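-- pv_equiv track=rewrite | github.com/Thireb/Train-Ticketing | ticketing/views.py | get_station_zone
-- ===== SOURCE A (Python) =====
-- zone_map = {
--     "Central": {
--         "Centrala": [
--             "Rede",
--             "Ninia",
--             "Bylyn",
--             "Frestin",
--             "Lomil",
--             "Yaen",
--             "Jaund",
--             "Tallan",
--         ],
--         "Frestin": ["Soth"],
--     },
--     "Midtown": {
--         "Yaen": ["Quthiel", "Wicyt"],
--         "Jaund": ["Riladia"],
--         "Tallan": ["Oloadus"],
--         "Ninia": ["Sylas"],
--         "Lomil": ["Garion"],
--         "Garion": ["Ralith"],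
--         "Soth": ["Obelyn"],
--         "Bylyn": ["Agralle"],
--         "Agralle": ["Docia", "Stonyam"],
--         "Rede": ["Riclya"],
--     },
--     "Downtown": {
--         "Riclya": ["Brunad"],
--         "Brunad": ["Erean"],
--         "Quthiel": ["Zord"],
--         "Riladia": ["Perinad"],
--         "Oloadus": ["Keivia"],
--         "Sylas": ["Elyot"],
--         "Elyot": ["Adohad"],
--         "Ralith": ["Holmer"],
--         "Holmer": ["Vertwall"],
--         "Vertwall": ["Ruril"],
--         "Obelyn": ["Ederif"],
--         "Stonyam": ["Ryall"],
--         "Ryall": ["Pryn"],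
--         "Docia": ["Marend"],
--     }
-- }
--
-- def get_station_zone(station_name):
--     """Find which zone a station belongs to"""
--     for zone, areas in zone_map.items():
--         # Check main stations
--         if station_name in areas:
--             return zone
--         # Check connected stations
--         for main_station, connected in areas.items():
--             if station_name in connected:
--                 return zone
--     return None
-- ===== SOURCE B (Python) =====
-- # Flat precomputed lookup table: station -> zone (earliest zone wins for duplicates).
-- STATION_ZONE = {
--     "Centrala": "Central", "Rede": "Central", "Ninia": "Central",
--     "Bylyn": "Central", "Frestin": "Central", "Lomil": "Central",
--     "Yaen": "Central", "Jaund": "Central", "Tallan": "Central",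
--     "Soth": "Central",
--     "Quthiel": "Midtown", "Wicyt": "Midtown", "Riladia": "Midtown",
--     "Oloadus": "Midtown", "Sylas": "Midtown", "Garion": "Midtown",
--     "Ralith": "Midtown", "Obelyn": "Midtown", "Agralle": "Midtown",
--     "Docia": "Midtown", "Stonyam": "Midtown", "Riclya": "Midtown",
--     "Brunad": "Downtown", "Erean": "Downtown", "Zord": "Downtown",
--     "Perinad": "Downtown", "Keivia": "Downtown", "Elyot": "Downtown",
--     "Adohad": "Downtown", "Holmer": "Downtown", "Vertwall": "Downtown",
--     "Ruril": "Downtown", "Ederif": "Downtown", "Ryall": "Downtown",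
--     "Pryn": "Downtown", "Marend": "Downtown",
-- }
--
-- def get_station_zone(station_name):
--     """Find which zone a station belongs to"""
--     return STATION_ZONE.get(station_name)
-- ===== Notes on version B (the rewrite author's own statement) =====
-- stated objective: simpler
-- what changed: B replaces A's per-call nested scan of zone_map by a flat precomputed station->zone dict literal (earliest zone wins for duplicate station names), so each call is a single dict lookup.
import Mathlib
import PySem

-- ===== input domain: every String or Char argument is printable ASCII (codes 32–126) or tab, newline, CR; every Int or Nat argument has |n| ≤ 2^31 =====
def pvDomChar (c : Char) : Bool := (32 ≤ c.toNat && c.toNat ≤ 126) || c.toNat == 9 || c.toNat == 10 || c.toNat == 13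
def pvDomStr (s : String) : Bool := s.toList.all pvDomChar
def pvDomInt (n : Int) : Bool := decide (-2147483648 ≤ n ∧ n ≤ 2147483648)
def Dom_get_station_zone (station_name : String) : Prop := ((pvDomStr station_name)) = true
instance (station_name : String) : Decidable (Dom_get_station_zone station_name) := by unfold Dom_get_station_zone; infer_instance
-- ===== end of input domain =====

-- B replaces A's per-call nested scan of zone_map by a flat precomputed station->zone dict literal (earliest zone wins for duplicates); objective: simpler (one lookup per call).

-- ===== PORT A =====
-- the module constant zone_map A iterates over
def zoneMap : List (String × List (String × List String)) := [
  ("Central", [("Centrala", ["Rede", "Ninia", "Bylyn", "Frestin", "Lomil", "Yaen", "Jaund", "Tallan"]), ("Frestin", ["Soth"])]),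
  ("Midtown", [("Yaen", ["Quthiel", "Wicyt"]), ("Jaund", ["Riladia"]), ("Tallan", ["Oloadus"]), ("Ninia", ["Sylas"]), ("Lomil", ["Garion"]), ("Garion", ["Ralith"]), ("Soth", ["Obelyn"]), ("Bylyn", ["Agralle"]), ("Agralle", ["Docia", "Stonyam"]), ("Rede", ["Riclya"])]),
  ("Downtown", [("Riclya", ["Brunad"]), ("Brunad", ["Erean"]), ("Quthiel", ["Zord"]), ("Riladia", ["Perinad"]), ("Oloadus", ["Keivia"]), ("Sylas", ["Elyot"]), ("Elyot", ["Adohad"]), ("Ralith", ["Holmer"]), ("Holmer", ["Vertwall"]), ("Vertwall", ["Ruril"]), ("Obelyn", ["Ederif"]), ("Stonyam", ["Ryall"]), ("Ryall", ["Pryn"]), ("Docia", ["Marend"])])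
]

-- inner loop: 'for main_station, connected in areas.items(): if station_name in connected: return zone'
def pvAConnScan (station_name zone : String) : List (String × List String) → Option String
  | [] => none
  | (_, connected) :: rest =>
    if connected.contains station_name then some zone
    else pvAConnScan station_name zone rest

-- outer loop over zone_map.items(); 'station_name in areas' is dict-key membership
def pvAZoneScan (station_name : String) : List (String × List (String × List String)) → Option String
  | [] => none
  | (zone, areas) :: rest =>
    if (areas.map Prod.fst).contains station_name then some zone
    else
      match pvAConnScan station_name zone areas with
      | some z => some z
      | none => pvAZoneScan station_name rest

def get_station_zone (station_name : String) : Option String :=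
  pvAZoneScan station_name zoneMap

-- ===== PORT B =====
-- the module constant STATION_ZONE, a flat literal dict
def stationZoneTable : PySem.Dict String String := PySem.Dict.mk [
  ("Centrala", "Central"),
  ("Rede", "Central"),
  ("Ninia", "Central"),
  ("Bylyn", "Central"),
  ("Frestin", "Central"),
  ("Lomil", "Central"),
  ("Yaen", "Central"),
  ("Jaund", "Central"),
  ("Tallan", "Central"),
  ("Soth", "Central"),
  ("Quthiel", "Midtown"),
  ("Wicyt", "Midtown"),
  ("Riladia", "Midtown"),
  ("Oloadus", "Midtown"),
  ("Sylas", "Midtown"),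
  ("Garion", "Midtown"),
  ("Ralith", "Midtown"),
  ("Obelyn", "Midtown"),
  ("Agralle", "Midtown"),
  ("Docia", "Midtown"),
  ("Stonyam", "Midtown"),
  ("Riclya", "Midtown"),
  ("Brunad", "Downtown"),
  ("Erean", "Downtown"),
  ("Zord", "Downtown"),
  ("Perinad", "Downtown"),
  ("Keivia", "Downtown"),
  ("Elyot", "Downtown"),
  ("Adohad", "Downtown"),
  ("Holmer", "Downtown"),
  ("Vertwall", "Downtown"),
  ("Ruril", "Downtown"),
  ("Ederif", "Downtown"),
  ("Ryall", "Downtown"),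
  ("Pryn", "Downtown"),
  ("Marend", "Downtown")
]

def get_station_zone_alt (station_name : String) : Option String :=
  stationZoneTable.get? station_name

-- ===== PRECONDITION & SPEC =====
def Spec_get_station_zone (station_name : String) (out : Option String) : Prop := out = get_station_zone_alt station_name
instance (station_name : String) (out : Option String) : Decidable (Spec_get_station_zone station_name out) := by unfold Spec_get_station_zone; infer_instance

-- ===== CLAIM =====
def Claim_equal_get_station_zone : Prop := ∀ (station_name : String), Dom_get_station_zone station_name → Spec_get_station_zone station_name (get_station_zone station_name)

-- ===== LEMMAS AND PROOFS =====

set_option maxRecDepth 100000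

-- both results depend on station_name only through equality with the 36 station names;
-- case-split on each, then show both return none for any other string
theorem pv_pointwise (station_name : String) :
    get_station_zone station_name = get_station_zone_alt station_name := by
  by_cases h0 : station_name = "Centrala"
  · subst h0; decide
  by_cases h1 : station_name = "Rede"
  · subst h1; decide
  by_cases h2 : station_name = "Ninia"
  · subst h2; decide
  by_cases h3 : station_name = "Bylyn"
  · subst h3; decide
  by_cases h4 : station_name = "Frestin"
  · subst h4; decide
  by_cases h5 : station_name = "Lomil"
  · subst h5; decide
  by_cases h6 : station_name = "Yaen"
  · subst h6; decide
  by_cases h7 : station_name = "Jaund"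
  · subst h7; decide
  by_cases h8 : station_name = "Tallan"
  · subst h8; decide
  by_cases h9 : station_name = "Soth"
  · subst h9; decide
  by_cases h10 : station_name = "Quthiel"
  · subst h10; decide
  by_cases h11 : station_name = "Wicyt"
  · subst h11; decide
  by_cases h12 : station_name = "Riladia"
  · subst h12; decide
  by_cases h13 : station_name = "Oloadus"
  · subst h13; decide
  by_cases h14 : station_name = "Sylas"
  · subst h14; decide
  by_cases h15 : station_name = "Garion"
  · subst h15; decide
  by_cases h16 : station_name = "Ralith"
  · subst h16; decide
  by_cases h17 : station_name = "Obelyn"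
  · subst h17; decide
  by_cases h18 : station_name = "Agralle"
  · subst h18; decide
  by_cases h19 : station_name = "Docia"
  · subst h19; decide
  by_cases h20 : station_name = "Stonyam"
  · subst h20; decide
  by_cases h21 : station_name = "Riclya"
  · subst h21; decide
  by_cases h22 : station_name = "Brunad"
  · subst h22; decide
  by_cases h23 : station_name = "Erean"
  · subst h23; decide
  by_cases h24 : station_name = "Zord"
  · subst h24; decide
  by_cases h25 : station_name = "Perinad"
  · subst h25; decide
  by_cases h26 : station_name = "Keivia"
  · subst h26; decide
  by_cases h27 : station_name = "Elyot"
  · subst h27; decide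
  by_cases h28 : station_name = "Adohad"
  · subst h28; decide
  by_cases h29 : station_name = "Holmer"
  · subst h29; decide
  by_cases h30 : station_name = "Vertwall"
  · subst h30; decide
  by_cases h31 : station_name = "Ruril"
  · subst h31; decide
  by_cases h32 : station_name = "Ederif"
  · subst h32; decide
  by_cases h33 : station_name = "Ryall"
  · subst h33; decide
  by_cases h34 : station_name = "Pryn"
  · subst h34; decide
  by_cases h35 : station_name = "Marend"
  · subst h35; decide
  simp [get_station_zone, get_station_zone_alt, stationZoneTable,
        PySem.Dict.get?, pvAZoneScan, pvAConnScan, zoneMap, List.contains_eq_mem,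
        h0, Ne.symm h0, h1, Ne.symm h1, h2, Ne.symm h2, h3, Ne.symm h3, h4, Ne.symm h4, h5, Ne.symm h5, h6, Ne.symm h6, h7, Ne.symm h7, h8, Ne.symm h8, h9, Ne.symm h9, h10, Ne.symm h10, h11, Ne.symm h11, h12, Ne.symm h12, h13, Ne.symm h13, h14, Ne.symm h14, h15, Ne.symm h15, h16, Ne.symm h16, h17, Ne.symm h17, h18, Ne.symm h18, h19, Ne.symm h19, h20, Ne.symm h20, h21, Ne.symm h21, h22, Ne.symm h22, h23, Ne.symm h23, h24, Ne.symm h24, h25, Ne.symm h25, h26, Ne.symm h26, h27, Ne.symm h27, h28, Ne.symm h28, h29, Ne.symm h29, h30, Ne.symm h30, h31, Ne.symm h31, h32, Ne.symm h32, h33, Ne.symm h33, h34, Ne.symm h34, h35, Ne.symm h35]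

-- ===== VERDICT =====
theorem get_station_zone_spec : Claim_equal_get_station_zone := by
  intro s _
  unfold Spec_get_station_zone
  exact pv_pointwise s
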